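-- pv_equiv track=rewrite | github.com/Difio3333/Python-DAU | main.py | create_major_pentatonic_scale
-- ===== SOURCE A (Python) =====
-- def create_major_pentatonic_scale(note):
--
-- 	scale=[]
--
-- 	majorPentatonicScale = [2,2,3,2,3]
--
-- 	i = 0
-- 	while i < 1:
-- 		z = 0
-- 		while z < len(majorPentatonicScale):
-- 			note += majorPentatonicScale[z]
-- 			scale.append(note)
-- 			z+=1
-- 		i+=1
-- 	return scale
-- ===== SOURCE B (Python) =====
-- def create_major_pentatonic_scale(note):
--     return [note + o for o in (2, 4, 7, 9, 12)]
-- ===== Notes on version B (the rewrite author's own statement) =====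
-- stated objective: simpler
-- what changed: Replaces the nested while loops with a running accumulator by a single map over the precomputed cumulative offsets (2,4,7,9,12).
import Mathlib
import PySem

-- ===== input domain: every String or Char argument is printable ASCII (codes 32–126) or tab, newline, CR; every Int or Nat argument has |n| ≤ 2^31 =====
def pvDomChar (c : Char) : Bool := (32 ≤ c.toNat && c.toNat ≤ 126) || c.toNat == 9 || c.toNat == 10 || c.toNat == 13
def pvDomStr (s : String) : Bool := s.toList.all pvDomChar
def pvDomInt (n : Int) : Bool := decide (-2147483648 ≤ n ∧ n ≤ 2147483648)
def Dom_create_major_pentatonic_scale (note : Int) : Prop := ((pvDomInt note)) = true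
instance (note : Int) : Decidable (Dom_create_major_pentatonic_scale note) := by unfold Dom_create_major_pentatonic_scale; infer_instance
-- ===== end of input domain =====

-- B replaces A's nested accumulator loops by one map over precomputed cumulative offsets (simpler).
-- ===== PORT A =====
-- inner while: z walks the interval list, note is a running sum, scale accumulates
def pvInnerA : List Int → Int → List Int → Int × List Int
  | [], note, scale => (note, scale)
  | step :: rest, note, scale => pvInnerA rest (note + step) (scale ++ [note + step])

-- outer while i < 1: exactly one iteration of the inner loop
def create_major_pentatonic_scale (note : Int) : List Int :=
  (pvInnerA [2, 2, 3, 2, 3] note []).2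

-- ===== PORT B =====
def create_major_pentatonic_scale_alt (note : Int) : List Int :=
  [(2 : Int), 4, 7, 9, 12].map (fun o => note + o)

-- ===== PRECONDITION & SPEC =====
def Spec_create_major_pentatonic_scale (note : Int) (out : List Int) : Prop := out = create_major_pentatonic_scale_alt note
instance (note : Int) (out : List Int) : Decidable (Spec_create_major_pentatonic_scale note out) := by unfold Spec_create_major_pentatonic_scale; infer_instance

-- ===== CLAIM (what is proved, stated in full; the proofs are below) =====
def Claim_equal_create_major_pentatonic_scale : Prop := ∀ (note : Int), Dom_create_major_pentatonic_scale note → Spec_create_major_pentatonic_scale note (create_major_pentatonic_scale note)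

-- ===== LEMMAS AND PROOFS =====

-- ===== VERDICT (by name: the statement is the Claim_ definition above) =====
theorem create_major_pentatonic_scale_spec : Claim_equal_create_major_pentatonic_scale := by
  intro note _
  unfold Spec_create_major_pentatonic_scale
  show _ = _
  simp [create_major_pentatonic_scale, create_major_pentatonic_scale_alt, pvInnerA]
  refine ⟨by ring, by ring, by ring, by ring⟩
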